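-- pv_equiv track=rewrite | github.com/bych-lee/competitive_programming | programmers/stack_queue/1.py | solution
-- ===== SOURCE A (Python) =====
-- def solution(progresses, speeds):
--     answer = []
--     count = 0
--     while progresses:
--         progresses = [min(x + y, 100) for x, y in zip(progresses, speeds)]
--         while progresses[0] == 100:
--             progresses.pop(0)
--             speeds.pop(0)
--             count += 1
--             if not progresses:
--                 break
--         if count:
--             answer.append(count)
--             count = 0
--     return answer
-- ===== SOURCE B (Python) =====
-- def solution(progresses, speeds):
--     answer = []
--     cur = 0    # finish day of the current batch's leader
--     cnt = 0
--     for x, y in zip(progresses, speeds):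
--         d = 1 if x + y >= 100 else -((x - 100) // y)
--         if cnt and d <= cur:
--             cnt += 1
--         else:
--             if cnt:
--                 answer.append(cnt)
--             cur = d
--             cnt = 1
--     if cnt:
--         answer.append(cnt)
--     return answer
-- ===== Notes on version B (the rewrite author's own statement) =====
-- stated objective: faster
-- what changed: B replaces A's day-by-day simulation (rebuilding the progress list every day and popping finished tasks) by a closed-form finish day ceil((100-x)/y) per task and a single pass grouping tasks by the running batch leader's finish day; intended as faster — a timing run saw A time out at n=16 where B returned, but could not measure a clean ratio.
import Mathlib
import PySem

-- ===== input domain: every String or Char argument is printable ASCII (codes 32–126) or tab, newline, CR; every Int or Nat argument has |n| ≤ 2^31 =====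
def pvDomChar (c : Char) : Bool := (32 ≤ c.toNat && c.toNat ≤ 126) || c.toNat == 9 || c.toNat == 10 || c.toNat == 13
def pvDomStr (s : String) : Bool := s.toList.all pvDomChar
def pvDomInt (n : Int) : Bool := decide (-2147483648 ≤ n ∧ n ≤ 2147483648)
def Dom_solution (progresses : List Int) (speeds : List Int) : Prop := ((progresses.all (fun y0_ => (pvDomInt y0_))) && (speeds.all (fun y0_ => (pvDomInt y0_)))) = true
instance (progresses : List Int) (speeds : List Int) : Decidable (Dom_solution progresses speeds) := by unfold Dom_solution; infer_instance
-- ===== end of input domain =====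

-- B replaces A's day-by-day simulation by a closed-form finish day per task and a single
-- grouping pass; intended as faster (a timing run saw A time out at n=16 where B returned,
-- but could not measure a clean ratio at a size both finish). Python A mutates its `speeds`
-- argument (pop(0)); the equivalence proved here is about the RETURN value only, B does not mutate.

-- ===== PORT A =====
-- inner `while progresses[0] == 100` loop; on [] Python would raise IndexError (excluded by Pre_)
def aPop : List Int → List Int → Int → (List Int × List Int × Int)
  | [], ss, c => ([], ss, c)
  | p :: ps, ss, c =>
      if p = 100 then aPop ps (ss.drop 1) (c + 1)
      else (p :: ps, ss, c)

-- fuel bound for the outer `while progresses` loop: totality guard only (it does not alter the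
-- computation); inside Pre_ it exceeds the number of days the Python loop runs
def aFuel (progresses speeds : List Int) : Nat :=
  ((progresses.zip speeds).map (fun xy => ((101 : Int) - xy.1).toNat + 1)).sum + 1

def aLoop : Nat → List Int → List Int → List Int → Int → List Int
  | 0, _, _, ans, _ => ans
  | fuel + 1, ps, ss, ans, count =>
      if ps = [] then ans
      else
        let ps1 := (ps.zip ss).map (fun xy => min (xy.1 + xy.2) 100)
        let r := aPop ps1 ss count
        aLoop fuel r.1 r.2.1 (if r.2.2 ≠ 0 then ans ++ [r.2.2] else ans)
          (if r.2.2 ≠ 0 then 0 else r.2.2)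

def solution (progresses : List Int) (speeds : List Int) : List Int :=
  aLoop (aFuel progresses speeds) progresses speeds [] 0

-- ===== PORT B =====
-- finish day of one task: 1 if x + y >= 100 else ceil((100-x)/y) written as -((x-100)//y)
def bDays (x y : Int) : Int :=
  if 100 ≤ x + y then 1 else -(PySem.Int.floordiv (x - 100) y)

-- one step of B's single pass: state (answer, leader's finish day, batch count)
def bStep : (List Int × Int × Int) → (Int × Int) → (List Int × Int × Int) :=
  fun s p =>
    let d := bDays p.1 p.2
    if s.2.2 ≠ 0 ∧ d ≤ s.2.1 then (s.1, s.2.1, s.2.2 + 1)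
    else ((if s.2.2 ≠ 0 then s.1 ++ [s.2.2] else s.1), d, 1)

def solution_alt (progresses : List Int) (speeds : List Int) : List Int :=
  let r := (progresses.zip speeds).foldl bStep ([], 0, 0)
  if r.2.2 ≠ 0 then r.1 ++ [r.2.2] else r.1

-- ===== PRECONDITION & SPEC =====
-- Pre_ excludes exactly the inputs on which A never returns a value: nonempty progresses with
-- empty speeds (IndexError on the inner while), and any task behind the leading already-finished
-- prefix whose speed is negative, or whose speed is ≤ 0 with progress+speed < 100 — such a task
-- never reads 100 when it reaches the front, so A's outer loop runs forever.
def Pre_solution (progresses : List Int) (speeds : List Int) : Prop :=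
  (progresses = [] ∨ speeds ≠ []) ∧
  ∀ p ∈ (progresses.zip speeds).dropWhile (fun q => decide (100 ≤ q.1 + q.2)),
    1 ≤ p.2 ∨ (100 ≤ p.1 + p.2 ∧ 0 ≤ p.2)

instance (progresses : List Int) (speeds : List Int) : Decidable (Pre_solution progresses speeds) := by
  unfold Pre_solution; infer_instance

def pvWitness_solution : List Int × List Int := ([93, 30, 55], [1, 30, 5])

def Spec_solution (progresses : List Int) (speeds : List Int) (out : List Int) : Prop := out = solution_alt progresses speeds
instance (progresses : List Int) (speeds : List Int) (out : List Int) : Decidable (Spec_solution progresses speeds out) := by unfold Spec_solution; infer_instance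

-- ===== CLAIM (what is proved, stated in full; the proofs are below) =====
def Claim_equal_solution : Prop := ∀ (progresses : List Int) (speeds : List Int), Dom_solution progresses speeds → Pre_solution progresses speeds → Spec_solution progresses speeds (solution progresses speeds)

-- ===== LEMMAS AND PROOFS =====

-- a task that can be waited for: positive speed, or already ≥ 100 with nonnegative speed
def pairOK (p : Int × Int) : Prop := 1 ≤ p.2 ∨ (100 ≤ p.1 + p.2 ∧ 0 ≤ p.2)

-- abstract batch grouping by the leader's finish day
def groupSpec : List (Int × Int) → List Int
  | [] => []
  | p :: rest =>
      (1 + ((rest.takeWhile (fun q => decide (bDays q.1 q.2 ≤ bDays p.1 p.2))).length : Int)) ::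
        groupSpec (rest.dropWhile (fun q => decide (bDays q.1 q.2 ≤ bDays p.1 p.2)))
  termination_by l => l.length
  decreasing_by
    simp only [List.length_cons]
    exact Nat.lt_succ_of_le (List.length_dropWhile_le _ _)

lemma min_step (x y s : Int) (hy : 0 ≤ y) :
    min (min (x + s * y) 100 + y) 100 = min (x + (s + 1) * y) 100 := by
  have h : x + (s + 1) * y = (x + s * y) + y := by ring
  rw [h]; omega

lemma bDays_pos (x y : Int) (h : 1 ≤ y ∨ 100 ≤ x + y) : 1 ≤ bDays x y := by
  by_cases h100 : 100 ≤ x + y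
  · simp [bDays, h100]
  · have hy : 1 ≤ y := h.resolve_right h100
    have hlt : PySem.Int.floordiv (x - 100) y < 0 := by
      rw [PySem.Int.floordiv_lt_iff_lt_mul (by omega : (0:Int) < y)]
      omega
    simp only [bDays, if_neg h100]
    omega

lemma bDays_le (x y : Int) (hy : 1 ≤ y) (h : ¬ 100 ≤ x + y) : bDays x y ≤ 100 - x := by
  have hy0 : (0:Int) < y := by omega
  have hle : x - 100 ≤ PySem.Int.floordiv (x - 100) y := by
    rw [PySem.Int.le_floordiv_iff_mul_le hy0]
    nlinarith
  simp only [bDays, if_neg h]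
  omega

lemma pairOK_char (x y s : Int) (hp : pairOK (x, y)) (hs : 1 ≤ s) :
    (min (x + s * y) 100 = 100 ↔ bDays x y ≤ s) := by
  by_cases hy1 : 1 ≤ y
  · by_cases h100 : 100 ≤ x + y
    · have hd : 100 ≤ x + s * y := by nlinarith
      simp only [bDays, if_pos h100]
      omega
    · have hy0 : (0:Int) < y := by omega
      have hiff : -s ≤ PySem.Int.floordiv (x - 100) y ↔ 100 ≤ x + s * y := by
        rw [PySem.Int.le_floordiv_iff_mul_le hy0]
        constructor <;> intro hh <;> nlinarith
      simp only [bDays, if_neg h100]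
      omega
  · rcases hp with hp | hp
    · exact absurd hp hy1
    · have hyz : y = 0 := by simp at hp; omega
      have hx : 100 ≤ x + y := hp.1
      simp only [bDays, if_pos hx]
      subst hyz
      simp only [mul_zero]
      omega

lemma aPop_spec (ones : List Int) (restl : List Int) :
    (∀ o ∈ ones, o = 100) → (∀ h, restl.head? = some h → h ≠ 100) →
    ∀ (ss : List Int) (c : Int),
    aPop (ones ++ restl) ss c = (restl, ss.drop ones.length, c + ones.length) := by
  intro hones hrest
  induction ones with
  | nil =>
      intro ss c
      cases restl with
      | nil => simp [aPop]
      | cons h tl =>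
          have hne : h ≠ 100 := hrest h rfl
          simp [aPop, hne]
  | cons o ones' ih =>
      intro ss c
      have ho : o = 100 := hones o (by simp)
      have ih' := ih (fun q hq => hones q (by simp [hq])) (ss.drop 1) (c + 1)
      simp only [List.cons_append, aPop, if_pos ho]
      rw [ih']
      simp only [List.drop_drop, List.length_cons, Prod.mk.injEq, true_and]
      refine ⟨?_, ?_⟩
      · congr 1
        omega
      · push_cast
        ring

lemma zip_map_snd (L : List (Int × Int)) (f : Int × Int → Int) :
    ∀ restl : List Int,
    (L.map f).zip (L.map Prod.snd ++ restl) = L.map (fun p => (f p, p.2)) := by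
  induction L with
  | nil => intro restl; simp
  | cons p L' ih =>
      intro restl
      simp only [List.map_cons, List.cons_append, List.zip_cons_cons]
      rw [ih restl]

lemma zip_snd_decomp (ps : List Int) : ∀ ss : List Int,
    (ps.zip ss).map Prod.snd ++ ss.drop ps.length = ss := by
  induction ps with
  | nil => intro ss; simp
  | cons p ps' ih =>
      intro ss
      cases ss with
      | nil => simp
      | cons s2 ss' =>
          simp only [List.zip_cons_cons, List.map_cons, List.cons_append,
            List.length_cons, List.drop_succ_cons]
          rw [ih ss']

lemma dropWhile_head_false {α : Type} (pr : α → Bool) (l : List α) (a : α)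
    (h : (l.dropWhile pr).head? = some a) : pr a = false := by
  induction l with
  | nil => simp at h
  | cons a' l' ih =>
      by_cases hp : pr a'
      · rw [List.dropWhile_cons_of_pos hp] at h
        exact ih h
      · rw [List.dropWhile_cons_of_neg hp] at h
        simp at h
        subst h
        simpa using hp

-- ---- B side ----

lemma bRun (run : List (Int × Int)) :
    ∀ (ans : List Int) (d1 c : Int), 1 ≤ c → (∀ q ∈ run, bDays q.1 q.2 ≤ d1) →
    run.foldl bStep (ans, d1, c) = (ans, d1, c + run.length) := by
  intro ans d1 c hc hall
  induction run generalizing c with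
  | nil => simp
  | cons q run' ih =>
      have hd : bDays q.1 q.2 ≤ d1 := hall q (by simp)
      have hc0 : c ≠ 0 := by omega
      have hstep : bStep (ans, d1, c) q = (ans, d1, c + 1) := by
        simp [bStep, hc0, hd]
      rw [List.foldl_cons, hstep, ih (c + 1) (by omega) (fun q hq => hall q (by simp [hq]))]
      simp only [List.length_cons, Prod.mk.injEq, true_and]
      push_cast
      ring

lemma b_group (M : List (Int × Int)) :
    ∀ (ans : List Int) (d1 c : Int), 1 ≤ c →
    (∀ q, M.head? = some q → ¬ bDays q.1 q.2 ≤ d1) →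
    (let r := M.foldl bStep (ans, d1, c);
     if r.2.2 ≠ 0 then r.1 ++ [r.2.2] else r.1) = ans ++ c :: groupSpec M := by
  induction M using groupSpec.induct with
  | case1 =>
      intro ans d1 c hc hhead
      have hc0 : c ≠ 0 := by omega
      simp [hc0, groupSpec]
  | case2 p rest ih =>
      intro ans d1 c hc hhead
      have hc0 : c ≠ 0 := by omega
      have hd : ¬ bDays p.1 p.2 ≤ d1 := hhead p rfl
      have hstep : bStep (ans, d1, c) p = (ans ++ [c], bDays p.1 p.2, 1) := by
        simp [bStep, hc0, hd]
      have hsplit := List.takeWhile_append_dropWhile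
        (p := fun q => decide (bDays q.1 q.2 ≤ bDays p.1 p.2)) (l := rest)
      have htk : ∀ q ∈ rest.takeWhile (fun q => decide (bDays q.1 q.2 ≤ bDays p.1 p.2)),
          bDays q.1 q.2 ≤ bDays p.1 p.2 := by
        intro q hq
        have := List.mem_takeWhile_imp hq
        simpa using this
      have hdr : ∀ q, (rest.dropWhile (fun q => decide (bDays q.1 q.2 ≤ bDays p.1 p.2))).head? = some q →
          ¬ bDays q.1 q.2 ≤ bDays p.1 p.2 := by
        intro q hq
        have := dropWhile_head_false _ _ _ hq
        simpa using this
      simp only [List.foldl_cons, hstep]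
      conv_lhs => rw [← hsplit]
      rw [List.foldl_append,
        bRun _ (ans ++ [c]) (bDays p.1 p.2) 1 (by omega) htk,
        ih (ans ++ [c]) (bDays p.1 p.2)
          (1 + ((rest.takeWhile (fun q => decide (bDays q.1 q.2 ≤ bDays p.1 p.2))).length : Int))
          (by omega) hdr]
      rw [groupSpec]
      simp

lemma b_start (L : List (Int × Int)) (ans : List Int) (cur : Int) :
    (let r := L.foldl bStep (ans, cur, 0);
     if r.2.2 ≠ 0 then r.1 ++ [r.2.2] else r.1) = ans ++ groupSpec L := by
  cases L with
  | nil => simp [groupSpec]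
  | cons p M =>
      have hstep : bStep (ans, cur, 0) p = (ans, bDays p.1 p.2, 1) := by
        simp [bStep]
      have hsplit := List.takeWhile_append_dropWhile
        (p := fun q => decide (bDays q.1 q.2 ≤ bDays p.1 p.2)) (l := M)
      have htk : ∀ q ∈ M.takeWhile (fun q => decide (bDays q.1 q.2 ≤ bDays p.1 p.2)),
          bDays q.1 q.2 ≤ bDays p.1 p.2 := by
        intro q hq
        have := List.mem_takeWhile_imp hq
        simpa using this
      have hdr : ∀ q, (M.dropWhile (fun q => decide (bDays q.1 q.2 ≤ bDays p.1 p.2))).head? = some q →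
          ¬ bDays q.1 q.2 ≤ bDays p.1 p.2 := by
        intro q hq
        have := dropWhile_head_false _ _ _ hq
        simpa using this
      simp only [List.foldl_cons, hstep]
      conv_lhs => rw [← hsplit]
      rw [List.foldl_append,
        bRun _ ans (bDays p.1 p.2) 1 (by omega) htk,
        b_group _ ans (bDays p.1 p.2)
          (1 + ((M.takeWhile (fun q => decide (bDays q.1 q.2 ≤ bDays p.1 p.2))).length : Int))
          (by omega) hdr]
      rw [groupSpec]

lemma b_eq_group (ps ss : List Int) : solution_alt ps ss = groupSpec (ps.zip ss) := by
  unfold solution_alt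
  exact b_start (ps.zip ss) [] 0

-- ---- A side: the simulation lemma ----

lemma sim_gen (fuel : Nat) :
    ∀ (L : List (Int × Int)) (g : Int × Int → Int) (ps ss restl ans : List Int) (t : Int),
    0 ≤ t →
    ps.zip ss = L.map (fun p => (g p, p.2)) →
    ss = L.map Prod.snd ++ restl →
    (ps = [] ↔ L = []) →
    (∀ p ∈ L, min (g p + p.2) 100 = min (p.1 + (t + 1) * p.2) 100) →
    (∀ p ∈ L, (min (p.1 + (t + 1) * p.2) 100 = 100 ↔ bDays p.1 p.2 ≤ t + 1)) →
    (∀ p ∈ L.dropWhile (fun q => decide (bDays q.1 q.2 ≤ t + 1)), pairOK p) →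
    (∀ p, L.head? = some p → t < bDays p.1 p.2) →
    (L.map (fun p => (bDays p.1 p.2 - t).toNat)).sum < fuel →
    aLoop fuel ps ss ans 0 = ans ++ groupSpec L := by
  induction fuel with
  | zero =>
      intro L g ps ss restl ans t ht hzip hss hemp hstep hchar hOK hhead hfuel
      omega
  | succ fuel ih =>
      intro L g ps ss restl ans t ht hzip hss hemp hstep hchar hOK hhead hfuel
      by_cases hps : ps = []
      · have hL : L = [] := hemp.mp hps
        subst hL
        simp [aLoop, hps, groupSpec]
      · have hLne : L ≠ [] := fun h => hps (hemp.mpr h)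
        have hOKDr : ∀ p ∈ L.dropWhile (fun q => decide (bDays q.1 q.2 ≤ t + 1)), pairOK p := hOK
        have hsplit : L.takeWhile (fun q => decide (bDays q.1 q.2 ≤ t + 1)) ++
            L.dropWhile (fun q => decide (bDays q.1 q.2 ≤ t + 1)) = L :=
          List.takeWhile_append_dropWhile
        have hps1 : (ps.zip ss).map (fun xy => min (xy.1 + xy.2) 100)
            = L.map (fun p => min (p.1 + (t + 1) * p.2) 100) := by
          rw [hzip, List.map_map]
          exact List.map_congr_left (fun p hp => hstep p hp)
        have hones : ∀ o ∈ (L.takeWhile (fun q => decide (bDays q.1 q.2 ≤ t + 1))).map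
            (fun p => min (p.1 + (t + 1) * p.2) 100), o = 100 := by
          intro o ho
          rcases List.mem_map.mp ho with ⟨q, hq, rfl⟩
          have hple : bDays q.1 q.2 ≤ t + 1 := by
            have := List.mem_takeWhile_imp hq
            simpa using this
          exact (hchar q ((List.takeWhile_sublist _).subset hq)).mpr hple
        have hrest : ∀ h, ((L.dropWhile (fun q => decide (bDays q.1 q.2 ≤ t + 1))).map
            (fun p => min (p.1 + (t + 1) * p.2) 100)).head? = some h → h ≠ 100 := by
          intro h hh
          cases hDrc : L.dropWhile (fun q => decide (bDays q.1 q.2 ≤ t + 1)) with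
          | nil => rw [hDrc] at hh; simp at hh
          | cons q Dr2 =>
              rw [hDrc] at hh
              simp only [List.map_cons, List.head?_cons, Option.some.injEq] at hh
              have hq0 : (fun q => decide (bDays q.1 q.2 ≤ t + 1)) q = false :=
                dropWhile_head_false (fun q => decide (bDays q.1 q.2 ≤ t + 1)) L q
                  (by rw [hDrc]; rfl)
              have hqn : ¬ bDays q.1 q.2 ≤ t + 1 := by simpa using hq0
              have hmem : q ∈ L := (List.dropWhile_sublist _).subset (by rw [hDrc]; simp)
              subst hh
              intro hcon
              exact hqn ((hchar q hmem).mp hcon)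
        have hpop := aPop_spec _ _ hones hrest ss 0
        have hdropss : ss.drop ((L.takeWhile (fun q => decide (bDays q.1 q.2 ≤ t + 1))).map
              (fun p => min (p.1 + (t + 1) * p.2) 100)).length
            = (L.dropWhile (fun q => decide (bDays q.1 q.2 ≤ t + 1))).map Prod.snd ++ restl := by
          conv_lhs => rw [hss, ← hsplit]
          rw [List.map_append, List.append_assoc]
          exact List.drop_left' (by simp)
        have hmain : aLoop (fuel + 1) ps ss ans 0 = aLoop fuel
            ((L.dropWhile (fun q => decide (bDays q.1 q.2 ≤ t + 1))).map
              (fun p => min (p.1 + (t + 1) * p.2) 100))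
            ((L.dropWhile (fun q => decide (bDays q.1 q.2 ≤ t + 1))).map Prod.snd ++ restl)
            (if ((0 : Int) + ((L.takeWhile (fun q => decide (bDays q.1 q.2 ≤ t + 1))).map
                  (fun p => min (p.1 + (t + 1) * p.2) 100)).length : Int) ≠ 0 then
              ans ++ [((0 : Int) + ((L.takeWhile (fun q => decide (bDays q.1 q.2 ≤ t + 1))).map
                  (fun p => min (p.1 + (t + 1) * p.2) 100)).length : Int)] else ans)
            (if ((0 : Int) + ((L.takeWhile (fun q => decide (bDays q.1 q.2 ≤ t + 1))).map
                  (fun p => min (p.1 + (t + 1) * p.2) 100)).length : Int) ≠ 0 then 0 else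
              ((0 : Int) + ((L.takeWhile (fun q => decide (bDays q.1 q.2 ≤ t + 1))).map
                  (fun p => min (p.1 + (t + 1) * p.2) 100)).length : Int)) := by
          conv_lhs => rw [aLoop]
          rw [if_neg hps]
          simp only [hps1]
          conv_lhs => rw [← hsplit]
          rw [List.map_append, hpop, hdropss]
        rw [hmain]
        clear hmain hpop hps1 hones hrest hdropss hzip hss hemp hstep hchar hsplit hps
        -- common facts for the recursive call on the remainder
        have hzip' := zip_map_snd (L.dropWhile (fun q => decide (bDays q.1 q.2 ≤ t + 1)))
          (fun p => min (p.1 + (t + 1) * p.2) 100) restl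
        have hstep' : ∀ p ∈ L.dropWhile (fun q => decide (bDays q.1 q.2 ≤ t + 1)),
            min ((fun p => min (p.1 + (t + 1) * p.2) 100) p + p.2) 100
              = min (p.1 + (t + 1 + 1) * p.2) 100 := by
          intro p hp
          have hy : 0 ≤ p.2 := by
            rcases hOKDr p hp with h | h
            · omega
            · exact h.2
          exact min_step p.1 p.2 (t + 1) hy
        have hchar' : ∀ p ∈ L.dropWhile (fun q => decide (bDays q.1 q.2 ≤ t + 1)),
            (min (p.1 + (t + 1 + 1) * p.2) 100 = 100 ↔ bDays p.1 p.2 ≤ t + 1 + 1) := by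
          intro p hp
          exact pairOK_char p.1 p.2 (t + 1 + 1) (hOKDr p hp) (by omega)
        have hOK' : ∀ p ∈ (L.dropWhile (fun q => decide (bDays q.1 q.2 ≤ t + 1))).dropWhile
            (fun q => decide (bDays q.1 q.2 ≤ t + 1 + 1)), pairOK p :=
          fun p hp => hOKDr p ((List.dropWhile_sublist _).subset hp)
        have hhead' : ∀ p, (L.dropWhile (fun q => decide (bDays q.1 q.2 ≤ t + 1))).head? = some p →
            t + 1 < bDays p.1 p.2 := by
          intro p hp
          have := dropWhile_head_false _ _ _ hp
          simp at this
          omega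
        have hsum_mono : ∀ (M : List (Int × Int)),
            (M.map (fun p => (bDays p.1 p.2 - (t + 1)).toNat)).sum
              ≤ (M.map (fun p => (bDays p.1 p.2 - t).toNat)).sum := by
          intro M
          exact List.sum_le_sum (fun q _ => by omega)
        -- write L as head :: tail to extract the head fuel term
        obtain ⟨p0, L2, rfl⟩ := List.exists_cons_of_ne_nil hLne
        have hp0 : t < bDays p0.1 p0.2 := hhead p0 rfl
        have hfuelL : (bDays p0.1 p0.2 - t).toNat
              + ((L2.map (fun p => (bDays p.1 p.2 - t).toNat)).sum) < fuel + 1 := by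
          simpa using hfuel
        by_cases hTpos : (fun q => decide (bDays q.1 q.2 ≤ t + 1)) p0
        · -- head is popped: takeWhile = p0 :: takeWhile L2, dropWhile = dropWhile L2
          have htk : (p0 :: L2).takeWhile (fun q => decide (bDays q.1 q.2 ≤ t + 1))
              = p0 :: L2.takeWhile (fun q => decide (bDays q.1 q.2 ≤ t + 1)) :=
            List.takeWhile_cons_of_pos hTpos
          have hdw : (p0 :: L2).dropWhile (fun q => decide (bDays q.1 q.2 ≤ t + 1))
              = L2.dropWhile (fun q => decide (bDays q.1 q.2 ≤ t + 1)) :=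
            List.dropWhile_cons_of_pos hTpos
          have hbd0 : bDays p0.1 p0.2 = t + 1 := by
            have := of_decide_eq_true hTpos
            omega
          have hfuel' : ((L2.dropWhile (fun q => decide (bDays q.1 q.2 ≤ t + 1))).map
              (fun p => (bDays p.1 p.2 - (t + 1)).toNat)).sum < fuel := by
            have h1 := hsum_mono (L2.dropWhile (fun q => decide (bDays q.1 q.2 ≤ t + 1)))
            have h2 : ((L2.dropWhile (fun q => decide (bDays q.1 q.2 ≤ t + 1))).map
                (fun p => (bDays p.1 p.2 - t).toNat)).sum
                ≤ (L2.map (fun p => (bDays p.1 p.2 - t).toNat)).sum :=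
              ((List.dropWhile_sublist _).map _).sum_le_sum (by simp)
            omega
          rw [hdw]
          rw [htk]
          have hcnt : ((0 : Int) + (((p0 :: L2.takeWhile (fun q => decide (bDays q.1 q.2 ≤ t + 1))).map
              (fun p => min (p.1 + (t + 1) * p.2) 100)).length : Int))
              = 1 + ((L2.takeWhile (fun q => decide (bDays q.1 q.2 ≤ t + 1))).length : Int) := by
            simp only [List.map_cons, List.length_cons, List.length_map]
            push_cast
            ring
          simp only [hcnt]
          have hne0 : (1 + ((L2.takeWhile (fun q => decide (bDays q.1 q.2 ≤ t + 1))).length : Int)) ≠ 0 := by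
            have : (0:Int) ≤ ((L2.takeWhile (fun q => decide (bDays q.1 q.2 ≤ t + 1))).length : Int) := by positivity
            omega
          rw [if_pos hne0, if_pos hne0]
          rw [ih (L2.dropWhile (fun q => decide (bDays q.1 q.2 ≤ t + 1)))
            (fun p => min (p.1 + (t + 1) * p.2) 100) _ _ restl _ (t + 1) (by omega)
            (by rw [hdw] at hzip'; exact hzip') rfl (by simp)
            (by rw [hdw] at hstep'; exact hstep')
            (by rw [hdw] at hchar'; exact hchar')
            (by rw [hdw] at hOK'; exact hOK')
            (by rw [hdw] at hhead'; exact hhead')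
            hfuel']
          -- align with groupSpec (p0 :: L2)
          rw [groupSpec]
          have hpredeq : (fun q : Int × Int => decide (bDays q.1 q.2 ≤ bDays p0.1 p0.2))
              = (fun q : Int × Int => decide (bDays q.1 q.2 ≤ t + 1)) := by
            funext q
            rw [hbd0]
          rw [hpredeq]
          simp [List.append_assoc]
        · -- head not popped: takeWhile = [], dropWhile = whole list
          have htk : (p0 :: L2).takeWhile (fun q => decide (bDays q.1 q.2 ≤ t + 1)) = [] :=
            List.takeWhile_cons_of_neg hTpos
          have hdw : (p0 :: L2).dropWhile (fun q => decide (bDays q.1 q.2 ≤ t + 1)) = p0 :: L2 :=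
            List.dropWhile_cons_of_neg hTpos
          have hbd0 : t + 1 < bDays p0.1 p0.2 := by
            have h := hTpos
            simp only [decide_eq_true_eq] at h
            omega
          rw [hdw]
          rw [htk]
          simp only [List.map_nil, List.length_nil, Nat.cast_zero, add_zero, ne_eq,
            not_true_eq_false, if_false, ite_self]
          have hallOK : ∀ p ∈ p0 :: L2, pairOK p := by
            rw [hdw] at hOKDr; exact hOKDr
          have hfuel' : ((p0 :: L2).map (fun p => (bDays p.1 p.2 - (t + 1)).toNat)).sum < fuel := by
            have h2 := hsum_mono L2
            simp only [List.map_cons, List.sum_cons]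
            omega
          rw [ih (p0 :: L2) (fun p => min (p.1 + (t + 1) * p.2) 100) _ _ restl _ (t + 1) (by omega)
            (by rw [hdw] at hzip'; exact hzip') rfl (by simp)
            (by rw [hdw] at hstep'; exact hstep')
            (by rw [hdw] at hchar'; exact hchar')
            (by rw [hdw] at hOK'; exact hOK')
            (fun p hp => by
              rw [hdw] at hhead'
              exact hhead' p hp)
            hfuel']

-- ---- assembling ----

lemma dropWhile_eq_pre (L : List (Int × Int))
    (h : ∀ q ∈ L.dropWhile (fun q => decide (100 ≤ q.1 + q.2)), pairOK q) :
    L.dropWhile (fun q => decide (bDays q.1 q.2 ≤ 1)) =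
      L.dropWhile (fun q => decide (100 ≤ q.1 + q.2)) := by
  induction L with
  | nil => rfl
  | cons p L2 ih =>
      by_cases h100 : (100:Int) ≤ p.1 + p.2
      · have hb : bDays p.1 p.2 = 1 := by simp [bDays, h100]
        rw [List.dropWhile_cons_of_pos (by simp [hb]),
            List.dropWhile_cons_of_pos (by simpa using h100)]
        apply ih
        have hh := h
        rw [List.dropWhile_cons_of_pos (by simpa using h100)] at hh
        exact hh
      · have hOKp : pairOK p := by
          apply h
          rw [List.dropWhile_cons_of_neg (by simpa using h100)]
          simp
        have hnb : ¬ bDays p.1 p.2 ≤ 1 := by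
          have hc := pairOK_char p.1 p.2 1 hOKp (by omega)
          simp only [one_mul] at hc
          omega
        rw [List.dropWhile_cons_of_neg (by simpa using hnb),
            List.dropWhile_cons_of_neg (by simpa using h100)]

lemma all_pairs_facts (L : List (Int × Int))
    (h : ∀ q ∈ L.dropWhile (fun q => decide (100 ≤ q.1 + q.2)), pairOK q) :
    ∀ p ∈ L, 100 ≤ p.1 + p.2 ∨ pairOK p := by
  intro p hp
  by_cases h100 : (100:Int) ≤ p.1 + p.2
  · exact Or.inl h100
  · right
    refine h p ?_
    have hsplit := List.takeWhile_append_dropWhile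
      (p := fun q => decide (100 ≤ q.1 + q.2)) (l := L)
    rcases List.mem_append.mp (by rw [hsplit]; exact hp) with hT | hD
    · have := List.mem_takeWhile_imp hT
      simp at this
      omega
    · exact hD

-- ===== VERDICT (by name: the statement is the Claim_ definition above) =====
theorem solution_spec : Claim_equal_solution := by
  intro ps ss _hdom hpre
  unfold Spec_solution
  rcases hpre with ⟨hpre1, hpre2⟩
  by_cases hps : ps = []
  · subst hps
    simp [solution, aFuel, aLoop, solution_alt]
  · have hssne : ss ≠ [] := by
      rcases hpre1 with h | h
      · exact absurd h hps
      · exact h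
    have hLne : ps.zip ss ≠ [] := by
      intro hL
      rcases List.zip_eq_nil_iff.mp hL with h | h
      · exact hps h
      · exact hssne h
    have hfacts := all_pairs_facts (ps.zip ss) hpre2
    have hchar0 : ∀ p ∈ ps.zip ss,
        (min (p.1 + ((0:Int) + 1) * p.2) 100 = 100 ↔ bDays p.1 p.2 ≤ 0 + 1) := by
      intro p hp
      simp only [zero_add, one_mul]
      rcases hfacts p hp with h | h
      · have hb : bDays p.1 p.2 = 1 := by simp [bDays, h]
        rw [hb]
        omega
      · have := pairOK_char p.1 p.2 1 h (by omega)
        simpa using this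
    have hhead0 : ∀ p, (ps.zip ss).head? = some p → (0:Int) < bDays p.1 p.2 := by
      intro p hp
      have hmem : p ∈ ps.zip ss := List.mem_of_mem_head? hp
      rcases hfacts p hmem with h | h
      · have hb : bDays p.1 p.2 = 1 := by simp [bDays, h]
        omega
      · have := bDays_pos p.1 p.2 (by rcases h with h | h; exacts [Or.inl h, Or.inr h.1])
        omega
    have hOK0 : ∀ p ∈ (ps.zip ss).dropWhile (fun q => decide (bDays q.1 q.2 ≤ (0:Int) + 1)),
        pairOK p := by
      simp only [zero_add]
      rw [dropWhile_eq_pre _ hpre2]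
      exact hpre2
    have hfuel0 : ((ps.zip ss).map (fun p => (bDays p.1 p.2 - (0:Int)).toNat)).sum
        < aFuel ps ss := by
      unfold aFuel
      have hle : ∀ p ∈ ps.zip ss,
          (bDays p.1 p.2 - (0:Int)).toNat ≤ ((101:Int) - p.1).toNat + 1 := by
        intro p hp
        rcases hfacts p hp with h | h
        · have hb : bDays p.1 p.2 = 1 := by simp [bDays, h]
          omega
        · by_cases h100 : (100:Int) ≤ p.1 + p.2
          · have hb : bDays p.1 p.2 = 1 := by simp [bDays, h100]
            omega
          · have hy : 1 ≤ p.2 := by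
              rcases h with h | h
              · exact h
              · exact absurd h.1 h100
            have h1 := bDays_le p.1 p.2 hy h100
            have h2 := bDays_pos p.1 p.2 (Or.inl hy)
            omega
      have := List.sum_le_sum hle
      omega
    have hmainres := sim_gen (aFuel ps ss) (ps.zip ss) Prod.fst ps ss (ss.drop ps.length) [] 0
      (le_refl 0)
      (by simp)
      (zip_snd_decomp ps ss).symm
      ⟨fun h => absurd h hps, fun h => absurd h hLne⟩
      (by intro p hp; norm_num)
      hchar0
      hOK0
      hhead0
      hfuel0
    unfold solution
    rw [hmainres, b_eq_group]
    simp
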